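-- pv_equiv track=rewrite | github.com/redniketop/bookbot | main.py | get_count_char_occurences
-- ===== SOURCE A (Python) =====
-- def get_count_char_occurences(text):
--     char_count = {}
--     for char in text:
--         lower_char = char.lower()
--         if lower_char.isalpha():
--             if lower_char in char_count:
--                 char_count[lower_char] += 1
--             else:
--                 char_count[lower_char] = 1
--     sorted_char_count = sorted(char_count.items())
--     return sorted_char_count
-- ===== SOURCE B (Python) =====
-- def get_count_char_occurences(text):
--     chars = sorted(c.lower() for c in text if c.lower().isalpha())
--     result = []
--     i = 0
--     n = len(chars)
--     while i < n:
--         j = i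
--         while j < n and chars[j] == chars[i]:
--             j += 1
--         result.append((chars[i], j - i))
--         i = j
--     return result
-- ===== Notes on version B (the rewrite author's own statement) =====
-- stated objective: alternative
-- what changed: Replaces the dict-of-counts accumulation followed by sorting the items with a sort of the lowercased alphabetic characters themselves followed by a single run-length scan that collapses each maximal run of equal characters into a (char, count) pair.
import Mathlib
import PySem

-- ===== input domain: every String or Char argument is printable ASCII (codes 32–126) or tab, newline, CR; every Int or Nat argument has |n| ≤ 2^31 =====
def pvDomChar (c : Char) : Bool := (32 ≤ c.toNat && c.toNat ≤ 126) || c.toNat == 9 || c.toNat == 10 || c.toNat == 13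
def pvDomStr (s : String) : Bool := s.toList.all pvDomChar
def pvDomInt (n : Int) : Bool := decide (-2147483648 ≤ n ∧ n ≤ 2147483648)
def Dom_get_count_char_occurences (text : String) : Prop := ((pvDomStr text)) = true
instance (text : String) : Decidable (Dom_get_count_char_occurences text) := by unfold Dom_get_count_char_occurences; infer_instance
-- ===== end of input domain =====

-- B sorts the lowercased alphabetic characters and collapses equal runs in one scan,
-- instead of A's dict-of-counts followed by sorting the items (alternative algorithm, same result).


-- ===== PORT A =====
-- dict accumulation: for each char, lower it; if alphabetic, bump its count; then sort the items
def get_count_char_occurences (text : String) : List (String × Int) :=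
  let char_count : PySem.Dict String Int :=
    text.toList.foldl (fun (d : PySem.Dict String Int) char =>
      let lower_char := PySem.Str.lower (String.ofList [char])
      if PySem.Str.strIsalpha lower_char then
        match d.get? lower_char with
        | some v => d.insert lower_char (v + 1)
        | none   => d.insert lower_char 1
      else d) PySem.Dict.empty
  PySem.List.sorted2 char_count.items Prod.fst Prod.snd

-- ===== PORT B =====
-- run-length scan over the sorted character list (Source B's while loops, as structural recursion)
def pvRuns : List String → List (String × Int)
  | [] => []
  | x :: rest =>
      (x, 1 + ((rest.takeWhile (fun y => y == x)).length : Int)) ::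
        pvRuns (rest.dropWhile (fun y => y == x))
  termination_by l => l.length
  decreasing_by
    simpa [Nat.lt_succ_iff] using (List.dropWhile_sublist (l := rest) (fun y => y == x)).length_le

def get_count_char_occurences_alt (text : String) : List (String × Int) :=
  let chars := PySem.List.sorted
    ((text.toList.filter (fun c => PySem.Str.strIsalpha (PySem.Str.lower (String.ofList [c])))).map
      (fun c => PySem.Str.lower (String.ofList [c]))) (fun s => s) false
  pvRuns chars

-- ===== PRECONDITION & SPEC =====
def Spec_get_count_char_occurences (text : String) (out : List (String × Int)) : Prop := out = get_count_char_occurences_alt text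
instance (text : String) (out : List (String × Int)) : Decidable (Spec_get_count_char_occurences text out) := by unfold Spec_get_count_char_occurences; infer_instance

-- ===== CLAIM (what is proved, stated in full; the proofs are below) =====
def Claim_equal_get_count_char_occurences : Prop := ∀ (text : String), Dom_get_count_char_occurences text → Spec_get_count_char_occurences text (get_count_char_occurences text)

-- ===== LEMMAS AND PROOFS =====

-- the multiset both programs count: the lowered alphabetic characters of text
def pvL (text : String) : List String :=
  (text.toList.filter (fun c => PySem.Str.strIsalpha (PySem.Str.lower (String.ofList [c])))).map
    (fun c => PySem.Str.lower (String.ofList [c]))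

-- A's dict is the counter of pvL text, so its items are (key, count) over the first-occurrence set
theorem portA_eq (text : String) :
    get_count_char_occurences text =
      PySem.List.sorted2
        ((PySem.Set.ofList (pvL text)).map (fun k => (k, ((pvL text).count k : Int))))
        Prod.fst Prod.snd := by
  unfold get_count_char_occurences pvL
  have hstep : (fun (d : PySem.Dict String Int) (char : Char) =>
      let lower_char := PySem.Str.lower (String.ofList [char])
      if PySem.Str.strIsalpha lower_char then
        match d.get? lower_char with
        | some v => d.insert lower_char (v + 1)
        | none   => d.insert lower_char 1
      else d) =
      (fun (d : PySem.Dict String Int) (char : Char) =>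
        if PySem.Str.strIsalpha (PySem.Str.lower (String.ofList [char])) then
          d.insert (PySem.Str.lower (String.ofList [char]))
            (d.getD (PySem.Str.lower (String.ofList [char])) 0 + 1)
        else d) := by
    funext d c
    simp only []
    split
    · cases h : d.get? (PySem.Str.lower (String.ofList [c])) <;>
        simp [PySem.Dict.getD_eq_get?_getD, h]
    · rfl
  rw [hstep, PySem.List.foldl_if_eq_foldl_filter
    (p := fun c => PySem.Str.strIsalpha (PySem.Str.lower (String.ofList [c]))), ← List.foldl_map
    (f := fun c => PySem.Str.lower (String.ofList [c]))
    (g := fun (d : PySem.Dict String Int) s => d.insert s (d.getD s 0 + 1)),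
    PySem.Dict.foldl_insert_getD_add_one_eq_counter]
  simp only [PySem.Dict.items_counter]

-- insertBy only compares the inserted element with elements of the list it is inserted into
theorem insertBy_congr {α : Type} (f g : α → α → Bool) (x : α) (ys : List α)
    (h : ∀ y ∈ ys, f x y = g x y) :
    PySem.List.insertBy f x ys = PySem.List.insertBy g x ys := by
  induction ys with
  | nil => rfl
  | cons y ys ih =>
    simp only [PySem.List.insertBy]
    rw [h y (by simp)]
    split
    · rfl
    · rw [ih (fun z hz => h z (by simp [hz]))]

-- insertion sort only ever compares elements drawn from the accumulator or the input list
theorem foldl_insertBy_congr {α : Type} (f g : α → α → Bool) :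
    ∀ (l acc : List α), (∀ a ∈ l, ∀ b ∈ acc, f a b = g a b) →
      (∀ a ∈ l, ∀ b ∈ l, f a b = g a b) →
      l.foldl (fun acc x => PySem.List.insertBy f x acc) acc =
        l.foldl (fun acc x => PySem.List.insertBy g x acc) acc := by
  intro l
  induction l with
  | nil => intro acc _ _; rfl
  | cons z zs ih =>
    intro acc hacc hl
    simp only [List.foldl_cons]
    rw [insertBy_congr f g z acc (fun b hb => hacc z (by simp) b hb)]
    exact ih (PySem.List.insertBy g z acc)
      (fun a ha b hb => by
        rcases (PySem.List.insertBy_mem_iff g z b acc).1 hb with h1 | h2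
        · rw [h1]; exact hl a (by simp [ha]) z (by simp)
        · exact hacc a (by simp [ha]) b h2)
      (fun a ha b hb => hl a (by simp [ha]) b (by simp [hb]))

-- with pairwise-distinct first components, Python's tuple sort is the sort by first component
theorem sorted2_eq_sorted_fst (xs : List (String × Int)) (h : (xs.map Prod.fst).Nodup) :
    PySem.List.sorted2 xs Prod.fst Prod.snd = PySem.List.sorted xs Prod.fst := by
  unfold PySem.List.sorted2 PySem.List.sorted
  simp only [if_neg (by simp : ¬ (false = true))]
  apply foldl_insertBy_congr _ _ xs []
  · intro a _ b hb; simp at hb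
  · intro a ha b hb
    by_cases h1 : a.1 < b.1
    · simp [h1]
    · by_cases h2 : b.1 < a.1
      · simp [h1, h2]
      · have heq : a.1 = b.1 := le_antisymm (not_lt.1 h2) (not_lt.1 h1)
        have : a = b := List.inj_on_of_nodup_map h ha hb heq
        subst this
        simp

-- the first-occurrence set of a ≤-sorted list is strictly increasing
theorem ofList_pairwise_lt (M : List String) (h : M.Pairwise (· ≤ ·)) :
    (PySem.Set.ofList M).Pairwise (· < ·) := by
  induction M with
  | nil => simp [PySem.Set.ofList_nil]
  | cons x rest ih =>
    rw [PySem.Set.ofList_cons]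
    rcases List.pairwise_cons.1 h with ⟨hx, hrest⟩
    refine List.pairwise_cons.2 ⟨?_, ?_⟩
    · intro y hy
      rcases (PySem.Set.mem_discard _ x y).1 hy with ⟨hy1, hy2⟩
      exact lt_of_le_of_ne (hx y ((PySem.Set.mem_ofList _ _).1 hy1)) (Ne.symm hy2)
    · exact (List.Pairwise.sublist (by simp [PySem.Set.discard]) (ih hrest))

theorem discard_not_mem (x : String) (tail : List String) (ht : x ∉ tail) :
    (PySem.Set.ofList tail).discard x = PySem.Set.ofList tail := by
  simp only [PySem.Set.discard]
  refine List.filter_eq_self.2 (fun y hy => ?_)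
  have : y ≠ x := fun h => ht (h ▸ (PySem.Set.mem_ofList _ _).1 hy)
  simp [this]

-- dropping a leading run of x's does not change the first-occurrence set past x
theorem discard_ofList_append (x : String) (run tail : List String)
    (hr : ∀ y ∈ run, y = x) (ht : x ∉ tail) :
    (PySem.Set.ofList (run ++ tail)).discard x = PySem.Set.ofList tail := by
  induction run with
  | nil => simpa using discard_not_mem x tail ht
  | cons y run ih =>
    have hy : y = x := hr y (by simp)
    subst hy
    rw [List.cons_append, PySem.Set.ofList_cons]
    have : ∀ s : PySem.Set String, ((y :: s).filter (fun z => !z == y)) = s.filter (fun z => !z == y) := by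
      intro s; simp
    simp only [PySem.Set.discard] at ih ⊢
    rw [this, List.filter_filter]
    simp only [Bool.and_self]
    exact ih (fun z hz => hr z (by simp [hz]))

-- on a ≤-sorted list, the run-length scan yields (key, count) over the first-occurrence set
theorem pvRuns_eq (M : List String) (h : M.Pairwise (· ≤ ·)) :
    pvRuns M = (PySem.Set.ofList M).map (fun k => (k, (M.count k : Int))) := by
  induction M using pvRuns.induct with
  | case1 => simp [pvRuns, PySem.Set.ofList_nil]
  | case2 x rest ih =>
    rcases List.pairwise_cons.1 h with ⟨hx, hrest⟩
    have hruntail : rest.takeWhile (fun y => y == x) ++ rest.dropWhile (fun y => y == x) = rest :=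
      List.takeWhile_append_dropWhile
    set run := rest.takeWhile (fun y => y == x) with hrundef
    set tail := rest.dropWhile (fun y => y == x) with htaildef
    have hrun : ∀ y ∈ run, y = x := fun y hy => by
      simpa using List.mem_takeWhile_imp hy
    have htail_pw : tail.Pairwise (· ≤ ·) :=
      List.Pairwise.sublist (List.dropWhile_sublist _) hrest
    have hxtail : x ∉ tail := by
      intro hmem
      cases htl : tail with
      | nil => rw [htl] at hmem; simp at hmem
      | cons hd t =>
        have hhd : (hd == x) = false := by
          have := List.head_dropWhile_not (fun y => y == x) (l := rest) (by rw [← htaildef, htl]; simp)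
          simpa [← htaildef, htl] using this
        have hhdne : hd ≠ x := by simpa using hhd
        have hhdmem : hd ∈ rest := by
          rw [← hruntail, htl]; simp
        have hxhd : x < hd := lt_of_le_of_ne (hx hd hhdmem) (Ne.symm hhdne)
        rw [htl] at hmem
        rcases List.mem_cons.1 hmem with h1 | h2
        · exact hhdne (h1.symm) |>.elim
        · have : hd ≤ x := by
            rw [htl] at htail_pw
            exact (List.pairwise_cons.1 htail_pw).1 x h2
          exact absurd (lt_of_lt_of_le hxhd this) (lt_irrefl x)
    have hcount_run_x : run.count x = run.length :=
      List.count_eq_length.2 (fun b hb => (hrun b hb).symm)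
    have hcount_x : (x :: rest).count x = run.length + 1 := by
      rw [List.count_cons_self, ← hruntail, List.count_append,
        hcount_run_x, List.count_eq_zero.2 hxtail]
    have hcount_tailkey : ∀ k ∈ tail, (x :: rest).count k = tail.count k := by
      intro k hk
      have hkx : k ≠ x := fun hkk => hxtail (hkk ▸ hk)
      have h1 : List.count k (x :: rest) = List.count k rest := by
        simp [Ne.symm hkx]
      rw [h1, ← hruntail, List.count_append,
        List.count_eq_zero.2 (fun hkr => hkx (hrun k hkr)), Nat.zero_add]
    have hset : PySem.Set.ofList (x :: rest) = x :: PySem.Set.ofList tail := by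
      rw [PySem.Set.ofList_cons, ← hruntail]
      rw [discard_ofList_append x run tail hrun hxtail]
    rw [pvRuns, hset, List.map_cons]
    congr 1
    · have : ((x :: rest).count x : Int) = 1 + (run.length : Int) := by
        rw [hcount_x]; push_cast; ring
      rw [this]
    · rw [ih htail_pw]
      exact (List.map_congr_left (fun k hk => by
        rw [hcount_tailkey k ((PySem.Set.mem_ofList _ _).1 hk)])).symm

-- ===== VERDICT (by name: the statement is the Claim_ definition above) =====
theorem get_count_char_occurences_spec : Claim_equal_get_count_char_occurences := by
  intro text _
  unfold Spec_get_count_char_occurences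
  have hB : get_count_char_occurences_alt text
      = pvRuns (PySem.List.sorted (pvL text) (fun s => s) false) := rfl
  set L := pvL text with hLdef
  set M := PySem.List.sorted L (fun s => s) false with hMdef
  have hM_pw : M.Pairwise (· ≤ ·) := PySem.List.sorted_pairwise L (fun s => s)
  have hMperm : M.Perm L := PySem.List.sorted_perm L (fun s => s) false
  have hcnt : ∀ k, M.count k = L.count k := hMperm.count_eq
  have hRuns : pvRuns M = (PySem.Set.ofList M).map (fun k => (k, (L.count k : Int))) := by
    rw [pvRuns_eq M hM_pw]
    exact List.map_congr_left (fun k _ => by rw [hcnt k])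
  have hSetPerm : (PySem.Set.ofList M).Perm (PySem.Set.ofList L) :=
    (List.perm_ext_iff_of_nodup (PySem.Set.nodup_ofList M) (PySem.Set.nodup_ofList L)).2
      (fun a => by
        rw [PySem.Set.mem_ofList, PySem.Set.mem_ofList]
        exact hMperm.mem_iff)
  have hperm : (pvRuns M).Perm
      ((PySem.Set.ofList L).map (fun k => (k, (L.count k : Int)))) := by
    rw [hRuns]; exact hSetPerm.map _
  have hpair : (pvRuns M).Pairwise (fun a b => a.1 < b.1) := by
    rw [hRuns]
    exact List.Pairwise.map _ (fun a b hab => hab) (ofList_pairwise_lt M hM_pw)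
  have hnd : (((PySem.Set.ofList L).map (fun k => (k, (L.count k : Int)))).map Prod.fst).Nodup := by
    rw [List.map_map]
    have hid : (Prod.fst ∘ fun k => (k, (L.count k : Int))) = id := rfl
    rw [hid, List.map_id]
    exact PySem.Set.nodup_ofList L
  rw [hB, portA_eq text, ← hLdef, sorted2_eq_sorted_fst _ hnd,
    PySem.List.sorted_eq_of_perm_of_pairwise_lt _ _ _ hperm hpair]
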